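-- pv_equiv track=rewrite | github.com/saribekyan/rau-independence-cup-2019 | bitonic/sol.py | solution
-- ===== SOURCE A (Python) =====
-- def solution(A):
--     n = len(A)
--     x = [None] * n
--     x[0] = (A[0], 0)
--     currVal = A[0]
--     currTotal = 0
--     for i in range(1, n):
--         currVal = max(currVal + 1, A[i])
--         currTotal += currVal - A[i]
--         x[i] = (currVal, currTotal)
--
--     answer = currTotal
--
--     currVal = A[-1]
--     currTotal = 0
--     for i in range(n - 2, -1, -1):
--         currVal = max(currVal + 1, A[i])
--         currTotal += currVal - A[i]
--
--         answer = min(answer,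
--             currTotal + x[i][1] - (min(currVal, x[i][0]) - A[i]))
--
--     return answer
-- ===== SOURCE B (Python) =====
-- def solution(A):
--     # Divide and conquer over candidate peaks, no stored table: a node re-chases
--     # the forward state across its left half, solves the right half, then the
--     # left, threading the backward state and the running best through the tree.
--     n = len(A)
--     def go(i, j, fv, fc, bv, bc, best):
--         # fv, fc: forward state at i; bv, bc: backward state just right of j
--         if i >= j:
--             a = A[i]
--             nbv = bv + 1 if bv + 1 > a else a
--             nbc = bc + (nbv - a)
--             cand = nbc + fc - (min(nbv, fv) - a)
--             return nbv, nbc, cand if best is None else min(best, cand)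
--         m = (i + j) // 2
--         mv, mc = fv, fc
--         for k in range(i + 1, m + 2):
--             a = A[k]
--             mv = mv + 1 if mv + 1 > a else a
--             mc += mv - a
--         bv, bc, best = go(m + 1, j, mv, mc, bv, bc, best)
--         return go(i, m, fv, fc, bv, bc, best)
--     return go(0, n - 1, A[0], 0, A[n - 1] - 1, 0, None)[2]
-- ===== Notes on version B (the rewrite author's own statement) =====
-- stated objective: alternative
-- what changed: B replaces A's two linear loops and the stored table x by a divide-and-conquer over candidate peaks: a node re-chases the forward state across its left half, recurses right then left, and threads the backward state and running best through the tree, so no per-index table ever exists (trading an O(log n) factor of recomputation for it).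
import Mathlib
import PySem

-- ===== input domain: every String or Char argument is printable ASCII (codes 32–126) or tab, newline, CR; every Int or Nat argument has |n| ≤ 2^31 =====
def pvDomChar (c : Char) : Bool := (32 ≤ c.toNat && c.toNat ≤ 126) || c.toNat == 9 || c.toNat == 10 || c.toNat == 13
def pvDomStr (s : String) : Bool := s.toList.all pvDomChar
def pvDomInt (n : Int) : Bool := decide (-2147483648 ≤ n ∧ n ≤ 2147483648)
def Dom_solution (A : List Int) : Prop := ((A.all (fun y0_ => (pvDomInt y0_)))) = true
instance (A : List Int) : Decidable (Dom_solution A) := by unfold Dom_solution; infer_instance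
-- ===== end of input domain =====

-- B replaces A's two loops and stored table by a divide-and-conquer over candidate peaks,
-- re-chasing the forward state per half instead of storing a table (objective: alternative;
-- O(n log n) against A's O(n)).

-- ===== PORT A =====
def solution (A : List Int) : Int :=
  let n : Int := (A.length : Int)
  let a0 := PySem.List.pyGetD A 0 0
  let fwd := (PySem.List.pyRange 1 n 1).foldl
    (fun (st : Int × Int × List (Int × Int)) i =>
      let ai := PySem.List.pyGetD A i 0
      let cv := max (st.1 + 1) ai
      let ct := st.2.1 + (cv - ai)
      (cv, ct, st.2.2 ++ [(cv, ct)]))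
    (a0, 0, [(a0, (0 : Int))])
  let x := fwd.2.2
  let answer := fwd.2.1
  let aLast := PySem.List.pyGetD A (-1) 0
  let bwd := (PySem.List.pyRange (n - 2) (-1) (-1)).foldl
    (fun (st : Int × Int × Int) i =>
      let ai := PySem.List.pyGetD A i 0
      let cv := max (st.1 + 1) ai
      let ct := st.2.1 + (cv - ai)
      let xi := PySem.List.pyGetD x i (0, 0)
      (cv, ct, min st.2.2 (ct + xi.2 - (min cv xi.1 - ai))))
    (aLast, 0, answer)
  bwd.2.2

-- ===== PORT B =====
-- Source B's nested `go(i, j, fv, fc, bv, bc, best)` divide-and-conquer; the inner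
-- `for k in range(i+1, m+2)` chase is the fold over List.range' (i+1) (m+1-i),
-- the same k values in the same order; `best is None` is the Option match.
def solutionGo (A : List Int) (i j : Nat) (fv fc bv bc : Int) (best : Option Int) :
    Int × Int × Option Int :=
  if j ≤ i then
    let a := A.getD i 0
    let nbv := if bv + 1 > a then bv + 1 else a
    let nbc := bc + (nbv - a)
    let cand := nbc + fc - (min nbv fv - a)
    (nbv, nbc, some (match best with | none => cand | some b => min b cand))
  else
    let m := (i + j) / 2
    let g := (List.range' (i + 1) (m + 1 - i)).foldl
      (fun (st : Int × Int) k =>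
        let a := A.getD k 0
        let gv := if st.1 + 1 > a then st.1 + 1 else a
        (gv, st.2 + (gv - a))) (fv, fc)
    let r := solutionGo A (m + 1) j g.1 g.2 bv bc best
    solutionGo A i m fv fc r.1 r.2.1 r.2.2
termination_by j - i
decreasing_by all_goals omega

def solution_alt (A : List Int) : Int :=
  match A with
  | [] => 0          -- unreachable under Pre_: Python raises IndexError at A[0] / A[n-1]
  | _ :: _ =>
    let n := A.length
    match (solutionGo A 0 (n - 1) (A.getD 0 0) 0 (A.getD (n - 1) 0 - 1) 0 none).2.2 with
    | some b => b
    | none => 0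

-- ===== PRECONDITION & SPEC =====
-- Pre_ excludes only the empty list, on which Python A raises IndexError at its first subscript.
def Pre_solution (A : List Int) : Prop := A ≠ []
instance (A : List Int) : Decidable (Pre_solution A) := by unfold Pre_solution; infer_instance
def pvWitness_solution : List Int := ([3, 1, 2] : List Int)
def Spec_solution (A : List Int) (out : Int) : Prop := out = solution_alt A
instance (A : List Int) (out : Int) : Decidable (Spec_solution A out) := by unfold Spec_solution; infer_instance

-- ===== CLAIM (what is proved, stated in full; the proofs are below) =====
def Claim_equal_solution : Prop := ∀ (A : List Int), Dom_solution A → Pre_solution A → Spec_solution A (solution A)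

-- ===== LEMMAS AND PROOFS =====

-- A's forward chase state after index k: (value, cost) of the cheapest strictly-increasing prefix.
def pvFwd (A : List Int) : Nat → Int × Int
  | 0 => (A.getD 0 0, 0)
  | k+1 =>
    let p := pvFwd A k
    let a := A.getD (k+1) 0
    let cv := max (p.1 + 1) a
    (cv, p.2 + (cv - a))

-- A's backward chase state after k steps (at index A.length - 1 - k).
def pvBwd (A : List Int) : Nat → Int × Int
  | 0 => (A.getD (A.length - 1) 0, 0)
  | k+1 =>
    let p := pvBwd A k
    let a := A.getD (A.length - 2 - k) 0
    let cv := max (p.1 + 1) a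
    (cv, p.2 + (cv - a))

-- Candidate answer with peak at index A.length - 1 - k.
def pvTerm (A : List Int) (k : Nat) : Int :=
  (pvBwd A k).2 + (pvFwd A (A.length - 1 - k)).2 -
    (min (pvBwd A k).1 (pvFwd A (A.length - 1 - k)).1 - A.getD (A.length - 1 - k) 0)

-- Running minimum of the candidates with peaks at indices i .. A.length - 1.
def pvM (A : List Int) (i : Nat) : Int :=
  List.foldl min ((pvFwd A (A.length - 1)).2)
    ((List.range (A.length - 1 - i)).map (fun j => pvTerm A (j + 1)))

-- A's forward fold builds the table of pvFwd states.
theorem pvA_fwd (A : List Int) (m : Nat) (hm : 1 ≤ m) :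
    (PySem.List.pyRange 1 (m : Int) 1).foldl
      (fun (st : Int × Int × List (Int × Int)) i =>
        let ai := PySem.List.pyGetD A i 0
        let cv := max (st.1 + 1) ai
        let ct := st.2.1 + (cv - ai)
        (cv, ct, st.2.2 ++ [(cv, ct)]))
      (PySem.List.pyGetD A 0 0, 0, [(PySem.List.pyGetD A 0 0, (0 : Int))]) =
    ((pvFwd A (m - 1)).1, (pvFwd A (m - 1)).2, (List.range m).map (pvFwd A)) := by
  induction m with
  | zero => omega
  | succ m ih =>
    cases Nat.eq_or_lt_of_le hm with
    | inl h =>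
      have : m = 0 := by omega
      subst this
      rw [show ((1 : Nat) : Int) = 1 by norm_num, PySem.List.pyRange_one_eq_nil le_rfl]
      simp [pvFwd, PySem.List.pyGetD_zero]
    | inr h =>
      have hm1 : 1 ≤ m := by omega
      have hcast : ((m + 1 : Nat) : Int) = (m : Int) + 1 := by push_cast; ring
      rw [hcast, PySem.List.pyRange_one_succ_right (by exact_mod_cast hm1), List.foldl_append,
        ih hm1]
      obtain ⟨m', rfl⟩ : ∃ m', m = m' + 1 := ⟨m - 1, by omega⟩
      simp only [List.foldl_cons, List.foldl_nil, PySem.List.pyGetD_natCast]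
      have hstep : pvFwd A (m' + 1) =
          (max ((pvFwd A m').1 + 1) (A.getD (m'+1) 0),
           (pvFwd A m').2 + (max ((pvFwd A m').1 + 1) (A.getD (m'+1) 0) - A.getD (m'+1) 0)) := by
        simp [pvFwd]
      simp [hstep, List.getD, List.range_succ]

-- A's backward fold accumulates the running min of pvTerm over peaks from the right.
theorem pvA_bwd (A : List Int) (m : Nat) (hm : m ≤ A.length - 1) :
    (List.map (fun k => ((A.length : Int) - 2) - ((k : Nat) : Int)) (List.range m)).foldl
      (fun (st : Int × Int × Int) i =>
        let ai := PySem.List.pyGetD A i 0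
        let cv := max (st.1 + 1) ai
        let ct := st.2.1 + (cv - ai)
        let xi := PySem.List.pyGetD ((List.range A.length).map (pvFwd A)) i ((0 : Int), (0 : Int))
        (cv, ct, min st.2.2 (ct + xi.2 - (min cv xi.1 - ai))))
      (A.getD (A.length - 1) 0, 0, (pvFwd A (A.length - 1)).2) =
    ((pvBwd A m).1, (pvBwd A m).2,
     List.foldl min ((pvFwd A (A.length - 1)).2) ((List.range m).map (fun j => pvTerm A (j + 1)))) := by
  induction m with
  | zero => rfl
  | succ m ih =>
    have hm' : m ≤ A.length - 1 := by omega
    have hn2 : 2 ≤ A.length := by omega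
    rw [List.range_succ, List.map_append, List.foldl_append, ih hm']
    simp only [List.map_cons, List.map_nil, List.foldl_cons, List.foldl_nil]
    have hidx : ((A.length : Int) - 2) - ((m : Nat) : Int) = ((A.length - 2 - m : Nat) : Int) := by
      omega
    have hlt : A.length - 2 - m < A.length := by omega
    rw [hidx, PySem.List.pyGetD_natCast, PySem.List.pyGetD_natCast,
      PySem.List.getD_map_range _ _ _ _ hlt]
    have hbwd : pvBwd A (m + 1) =
        (max ((pvBwd A m).1 + 1) (A.getD (A.length - 2 - m) 0),
         (pvBwd A m).2 + (max ((pvBwd A m).1 + 1) (A.getD (A.length - 2 - m) 0) -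
            A.getD (A.length - 2 - m) 0)) := by
      simp [pvBwd]
    have hterm : pvTerm A (m + 1) =
        (pvBwd A (m+1)).2 + (pvFwd A (A.length - 2 - m)).2 -
          (min (pvBwd A (m+1)).1 (pvFwd A (A.length - 2 - m)).1 - A.getD (A.length - 2 - m) 0) := by
      have : A.length - 1 - (m + 1) = A.length - 2 - m := by omega
      rw [pvTerm, this]
    simp only [List.map_append, List.foldl_append, List.map_cons, List.map_nil,
      List.foldl_cons, List.foldl_nil]
    rw [hterm, hbwd]

theorem pvLastD (A : List Int) (hA : A ≠ []) :
    PySem.List.pyGetD A (-1) 0 = A.getD (A.length - 1) 0 := by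
  rw [PySem.List.pyGetD_neg_one A 0 hA, List.getLast_eq_getElem,
    List.getD_eq_getElem _ _ (by have := List.length_pos_iff.2 hA; omega)]

theorem pvSolutionA (A : List Int) (hA : A ≠ []) : solution A = pvM A 0 := by
  have hlen : 1 ≤ A.length := List.length_pos_iff.2 hA
  simp only [solution]
  rw [pvA_fwd A A.length hlen, pvLastD A hA]
  have htn : (((A.length : Int)) - 2 - (-1)).toNat = A.length - 1 := by omega
  rw [PySem.List.pyRange_neg_one, htn]
  rw [pvA_bwd A (A.length - 1) le_rfl]
  simp [pvM]


theorem pvIteMax (m y : Int) : (if m + 1 > y then m + 1 else y) = max (m + 1) y := by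
  rw [max_def]
  split_ifs <;> omega

theorem pvFwd_ge (A : List Int) (k : Nat) : A.getD k 0 ≤ (pvFwd A k).1 := by
  cases k with
  | zero => simp [pvFwd]
  | succ k => exact le_max_right _ _

-- backward state "just right of index j" (virtual seed when j is the last index)
def pvSeed (A : List Int) (j : Nat) : Int × Int :=
  if A.length - 1 ≤ j then (A.getD (A.length - 1) 0 - 1, 0) else pvBwd A (A.length - 2 - j)

-- candidate value with peak at index p
def pvC (A : List Int) (p : Nat) : Int :=
  if A.length - 1 ≤ p then (pvFwd A (A.length - 1)).2 else pvTerm A (A.length - 1 - p)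

-- B's best-threading step (None = no candidate yet)
def pvOmin (b : Option Int) (c : Int) : Option Int :=
  some (match b with | none => c | some x => min x c)

-- the candidates B meets in a segment, in B's order: peaks j, j-1, ..., i
def pvL (A : List Int) (i j : Nat) : List Int :=
  (List.range (j + 1 - i)).map (fun t => pvC A (j - t))

theorem pvOmin_some (x : Int) (l : List Int) :
    l.foldl pvOmin (some x) = some (l.foldl min x) := by
  induction l generalizing x with
  | nil => rfl
  | cons c t ih => exact ih (min x c)

-- one backward chase step from the seed right of j lands on pvBwd at j
theorem pvSeedStep (A : List Int) (j : Nat) (hj : j < A.length) :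
    (max ((pvSeed A j).1 + 1) (A.getD j 0),
     (pvSeed A j).2 + (max ((pvSeed A j).1 + 1) (A.getD j 0) - A.getD j 0)) =
    pvBwd A (A.length - 1 - j) := by
  by_cases h : A.length - 1 ≤ j
  · have hj' : j = A.length - 1 := by omega
    have h0 : A.length - 1 - j = 0 := by omega
    subst hj'
    rw [pvSeed, if_pos h, h0]
    simp [pvBwd]
  · have hk : A.length - 1 - j = (A.length - 2 - j) + 1 := by omega
    have hidx : A.length - 2 - (A.length - 2 - j) = j := by omega
    rw [pvSeed, if_neg h, hk]
    conv_rhs => rw [pvBwd]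
    rw [hidx]

-- the chase loop advances the forward state c steps
theorem pvChase (A : List Int) (i : Nat) : ∀ (c : Nat),
    (List.range' (i + 1) c).foldl
      (fun (st : Int × Int) k =>
        let a := A.getD k 0
        let gv := if st.1 + 1 > a then st.1 + 1 else a
        (gv, st.2 + (gv - a))) (pvFwd A i) = pvFwd A (i + c) := by
  intro c
  induction c with
  | zero => rfl
  | succ c ih =>
    rw [List.range'_concat, List.foldl_append, ih]
    simp only [List.foldl_cons, List.foldl_nil, pvIteMax]
    have h1 : i + (c + 1) = (i + c) + 1 := by omega
    have h2 : i + 1 + 1 * c = (i + c) + 1 := by omega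
    rw [h1, h2]
    rfl

-- B's candidate order splits at the midpoint
theorem pvL_split (A : List Int) (i m j : Nat) (h1 : i ≤ m) (h2 : m < j) :
    pvL A (m + 1) j ++ pvL A i m = pvL A i j := by
  unfold pvL
  have hn : j + 1 - i = (j - m) + (m + 1 - i) := by omega
  rw [hn, List.range_add, List.map_append]
  congr 1
  · have : j + 1 - (m + 1) = j - m := by omega
    rw [this]
  · rw [List.map_map]
    apply List.map_congr_left
    intro t ht
    rw [List.mem_range] at ht
    have : j - (j - m + t) = m - t := by omega
    simp [Function.comp, this]

-- the leaf: one backward step plus the peak-at-i candidate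
theorem pvGoLeaf (A : List Int) (i : Nat) (best : Option Int) (hj : i < A.length) :
    solutionGo A i i (pvFwd A i).1 (pvFwd A i).2 (pvSeed A i).1 (pvSeed A i).2 best =
      ((pvBwd A (A.length - 1 - i)).1, (pvBwd A (A.length - 1 - i)).2,
       (pvL A i i).foldl pvOmin best) := by
  rw [solutionGo, if_pos le_rfl]
  simp only [pvIteMax]
  have hstep := pvSeedStep A i hj
  have hL : pvL A i i = [pvC A i] := by
    have h1 : i + 1 - i = 1 := by omega
    simp [pvL, h1, List.range_succ]
  have hcand : (pvSeed A i).2 + (max ((pvSeed A i).1 + 1) (A.getD i 0) - A.getD i 0) +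
      (pvFwd A i).2 - (min (max ((pvSeed A i).1 + 1) (A.getD i 0)) (pvFwd A i).1 - A.getD i 0)
      = pvC A i := by
    have hv : max ((pvSeed A i).1 + 1) (A.getD i 0) = (pvBwd A (A.length - 1 - i)).1 := by
      rw [← hstep]
    have hc : (pvSeed A i).2 + (max ((pvSeed A i).1 + 1) (A.getD i 0) - A.getD i 0) =
        (pvBwd A (A.length - 1 - i)).2 := by
      rw [← hstep]
    rw [hc, hv]
    by_cases h : A.length - 1 ≤ i
    · have hi' : i = A.length - 1 := by omega
      have h0 : A.length - 1 - i = 0 := by omega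
      rw [pvC, if_pos h, h0]
      have hmin : min (pvBwd A 0).1 (pvFwd A i).1 = (pvBwd A 0).1 := by
        rw [pvBwd]
        exact min_eq_left (by rw [← hi']; exact pvFwd_ge A i)
      rw [hmin, pvBwd]
      dsimp only
      rw [hi']
      ring
    · rw [pvC, if_neg h, pvTerm]
      have h2 : A.length - 1 - (A.length - 1 - i) = i := by omega
      rw [h2]
  rw [Prod.mk.injEq, Prod.mk.injEq]
  refine ⟨?_, ?_, ?_⟩
  · rw [← hstep]
  · rw [← hstep]
  · rw [hL]
    simp only [List.foldl_cons, List.foldl_nil]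
    rw [← hcand]
    rfl

-- main invariant: go returns the backward state at i and folds the segment's candidates
theorem pvGoB (A : List Int) : ∀ (d i j : Nat) (best : Option Int),
    j - i ≤ d → i ≤ j → j < A.length →
    solutionGo A i j (pvFwd A i).1 (pvFwd A i).2 (pvSeed A j).1 (pvSeed A j).2 best =
      ((pvBwd A (A.length - 1 - i)).1, (pvBwd A (A.length - 1 - i)).2,
       (pvL A i j).foldl pvOmin best) := by
  intro d
  induction d with
  | zero =>
    intro i j best hd hij hj
    have hij' : i = j := by omega
    subst hij'
    exact pvGoLeaf A i best hj
  | succ d ih =>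
    intro i j best hd hij hj
    by_cases hle : j ≤ i
    · have hij' : i = j := by omega
      subst hij'
      exact pvGoLeaf A i best hj
    · rw [solutionGo, if_neg hle]
      have him : i ≤ (i + j) / 2 := by omega
      have hmj : (i + j) / 2 < j := by omega
      set m := (i + j) / 2 with hm
      have hchase := pvChase A i (m + 1 - i)
      have hmi : i + (m + 1 - i) = m + 1 := by omega
      rw [hmi] at hchase
      dsimp only
      rw [show ((pvFwd A i).1, (pvFwd A i).2) = pvFwd A i from rfl] at *
      rw [hchase]
      have hseedm : (pvSeed A m).1 = (pvBwd A (A.length - 1 - (m + 1))).1 ∧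
          (pvSeed A m).2 = (pvBwd A (A.length - 1 - (m + 1))).2 := by
        have hnm : ¬ (A.length - 1 ≤ m) := by omega
        have h2 : A.length - 1 - (m + 1) = A.length - 2 - m := by omega
        rw [pvSeed, if_neg hnm, h2]
        exact ⟨rfl, rfl⟩
      have hr := ih (m + 1) j best (by omega) (by omega) hj
      rw [hr]
      dsimp only
      rw [← hseedm.1, ← hseedm.2]
      have hl := ih i m ((pvL A (m + 1) j).foldl pvOmin best) (by omega) him (by omega)
      rw [hl, ← List.foldl_append, pvL_split A i m j him hmj]

-- ===== VERDICT (by name: the statement is the Claim_ definition above) =====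
theorem solution_spec : Claim_equal_solution := by
  intro A _hD hP
  unfold Spec_solution
  rw [pvSolutionA A hP]
  obtain ⟨a, t, rfl⟩ : ∃ a t, A = a :: t := by
    cases A with
    | nil => exact absurd rfl hP
    | cons a t => exact ⟨a, t, rfl⟩
  set A := a :: t with hA
  have hn : 1 ≤ A.length := by simp [hA]
  show pvM A 0 = solution_alt A
  have hgo := pvGoB A (A.length - 1) 0 (A.length - 1) none (by omega) (by omega) (by omega)
  have hfwd0 : pvFwd A 0 = (A.getD 0 0, 0) := by simp [pvFwd]
  have hseed : pvSeed A (A.length - 1) = (A.getD (A.length - 1) 0 - 1, 0) := by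
    rw [pvSeed, if_pos le_rfl]
  rw [hfwd0, hseed] at hgo
  have halt : solution_alt A =
      match (solutionGo A 0 (A.length - 1) (A.getD 0 0) 0 (A.getD (A.length - 1) 0 - 1) 0
        none).2.2 with
      | some b => b
      | none => 0 := rfl
  rw [halt, hgo]
  dsimp only
  -- the candidate list in B's order, peeled: first the peak-at-end candidate
  obtain ⟨n', hn'⟩ : ∃ n', A.length = n' + 1 := ⟨A.length - 1, by omega⟩
  have hLform : pvL A 0 (A.length - 1) =
      pvC A (A.length - 1) :: (List.range (A.length - 1)).map (fun k => pvTerm A (k + 1)) := by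
    rw [pvL]
    have h1 : A.length - 1 + 1 - 0 = A.length := by omega
    rw [h1, hn', List.range_succ_eq_map, List.map_cons, List.map_map]
    simp only [Nat.add_sub_cancel]
    congr 1
    apply List.map_congr_left
    intro k hk
    rw [List.mem_range] at hk
    have hlt : ¬ (A.length - 1 ≤ n' - (k + 1)) := by omega
    have h2 : A.length - 1 - (n' - (k + 1)) = k + 1 := by omega
    simp only [Function.comp_apply]
    rw [pvC, if_neg hlt, h2]
  rw [hLform]
  have hC : pvC A (A.length - 1) = (pvFwd A (A.length - 1)).2 := by
    rw [pvC, if_pos le_rfl]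
  simp only [List.foldl_cons]
  rw [show pvOmin none (pvC A (A.length - 1)) = some (pvC A (A.length - 1)) from rfl,
    pvOmin_some, hC]
  rfl
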